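-- pv_equiv track=rewrite | github.com/SharathSPhD/morphogenesis-sort | analysis/reports/generator.py | _count_state_changes
-- ===== SOURCE A (Python) =====
-- from typing import Dict, List, Any, Optional, Union, Type, Callable
--
-- def _count_state_changes(trajectory: List[Dict]) -> int:
--     """Count number of state changes in trajectory."""
--     if len(trajectory) < 2:
--         return 0
--
--     changes = 0
--     for i in range(1, len(trajectory)):
--         if trajectory[i]['state'] != trajectory[i-1]['state']:
--             changes += 1
--
--     return changes
-- ===== SOURCE B (Python) =====
-- def _count_state_changes(trajectory):
--     """Count number of state changes in trajectory (run-length boundary counting)."""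
--     if len(trajectory) < 2:
--         return 0
--     states = [d['state'] for d in trajectory]
--     n = len(states)
--     runs = 0
--     i = 0
--     while i < n:
--         runs += 1
--         s = states[i]
--         i += 1
--         while i < n and states[i] == s:
--             i += 1
--     return runs - 1
-- ===== Notes on version B (the rewrite author's own statement) =====
-- stated objective: alternative
-- what changed: B extracts the state sequence once and counts maximal runs of equal states with a run-skipping two-level loop, returning runs-1, instead of A's pairwise adjacent index comparison.
import Mathlib
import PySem

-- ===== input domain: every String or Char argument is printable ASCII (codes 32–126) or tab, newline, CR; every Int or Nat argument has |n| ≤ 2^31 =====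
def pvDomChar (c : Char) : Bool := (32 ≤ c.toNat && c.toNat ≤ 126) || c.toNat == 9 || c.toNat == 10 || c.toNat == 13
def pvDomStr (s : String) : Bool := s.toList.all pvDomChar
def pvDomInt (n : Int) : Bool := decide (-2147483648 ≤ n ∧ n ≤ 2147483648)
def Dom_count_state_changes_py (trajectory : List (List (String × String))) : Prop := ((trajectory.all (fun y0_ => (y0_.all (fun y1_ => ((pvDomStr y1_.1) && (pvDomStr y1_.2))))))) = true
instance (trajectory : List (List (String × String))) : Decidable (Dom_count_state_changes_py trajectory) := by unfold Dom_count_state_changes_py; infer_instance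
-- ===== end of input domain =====

-- ===== PORT A =====
-- B counts maximal runs of equal states and returns runs-1 instead of A's adjacent
-- index comparison; an alternative decomposition, not claimed faster.

-- d['state'] for a dict known (by Pre_) to carry the key: first-match assoc lookup.
def pvStateOf (d : List (String × String)) : String :=
  ((d.find? (fun kv => kv.1 == "state")).map (fun kv => kv.2)).getD ""

def count_state_changes_py (trajectory : List (List (String × String))) : Int :=
  if trajectory.length < 2 then 0
  else
    (PySem.List.pyRange 1 (trajectory.length : Int) 1).foldl
      (fun changes i =>
        if pvStateOf (PySem.List.pyGetD trajectory i []) ≠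
           pvStateOf (PySem.List.pyGetD trajectory (i - 1) []) then changes + 1 else changes) 0

-- ===== PORT B =====
-- the outer while loop of Source B: count one run, skip it (inner while = dropWhile);
-- the Nat fuel only bounds the iteration count (it is length, so it never runs out)
def pvRunsAux : Nat → List String → Int
  | _, [] => 0
  | 0, _ :: _ => 0
  | fuel + 1, s :: rest => 1 + pvRunsAux fuel (rest.dropWhile (· == s))

def count_state_changes_py_alt (trajectory : List (List (String × String))) : Int :=
  if trajectory.length < 2 then 0
  else
    let states := trajectory.map pvStateOf
    pvRunsAux states.length states - 1

-- ===== PRECONDITION & SPEC =====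
-- Pre_ excludes exactly the inputs where A raises KeyError: a trajectory of length ≥ 2
-- containing a dict without a 'state' key.
def Pre_count_state_changes_py (trajectory : List (List (String × String))) : Prop :=
  trajectory.length < 2 ∨
    ∀ d ∈ trajectory, (d.find? (fun kv => kv.1 == "state")).isSome = true
instance (trajectory : List (List (String × String))) : Decidable (Pre_count_state_changes_py trajectory) := by unfold Pre_count_state_changes_py; infer_instance
def pvWitness_count_state_changes_py : (List (List (String × String))) :=
  [[("state", "a")], [("state", "b")], [("state", "b")]]
def Spec_count_state_changes_py (trajectory : List (List (String × String))) (out : Int) : Prop := out = count_state_changes_py_alt trajectory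
instance (trajectory : List (List (String × String))) (out : Int) : Decidable (Spec_count_state_changes_py trajectory out) := by unfold Spec_count_state_changes_py; infer_instance

-- ===== CLAIM (what is proved, stated in full; the proofs are below) =====
def Claim_equal_count_state_changes_py : Prop := ∀ (trajectory : List (List (String × String))), Dom_count_state_changes_py trajectory → Pre_count_state_changes_py trajectory → Spec_count_state_changes_py trajectory (count_state_changes_py trajectory)

-- ===== LEMMAS AND PROOFS =====

-- number of adjacent unequal pairs in (p :: t)
def pvAdj : String → List String → Int
  | _, [] => 0
  | p, x :: r => (if x ≠ p then 1 else 0) + pvAdj x r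

theorem pvAdj_dropWhile (p : String) (t : List String) :
    pvAdj p (t.dropWhile (· == p)) = pvAdj p t := by
  induction t with
  | nil => rfl
  | cons x r ih =>
      by_cases h : x = p
      · have hb : (x == p) = true := by simp [h]
        subst h
        simp [pvAdj, ih]
      · have hb : (x == p) = false := by simp [h]
        simp [hb, pvAdj, h]

theorem pvRunsAux_eq_adj : ∀ (n : Nat) (p : String) (t : List String), t.length ≤ n →
    pvRunsAux (n + 1) (p :: t) = 1 + pvAdj p t := by
  intro n
  induction n with
  | zero =>
      intro p t ht
      have : t = [] := List.eq_nil_of_length_eq_zero (Nat.le_zero.mp ht)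
      subst this
      simp [pvRunsAux, pvAdj]
  | succ m ih =>
      intro p t ht
      rw [show pvRunsAux (m + 1 + 1) (p :: t) = 1 + pvRunsAux (m + 1) (t.dropWhile (· == p)) from rfl]
      rw [← pvAdj_dropWhile p t]
      rcases hd : t.dropWhile (· == p) with _ | ⟨x, r⟩
      · simp [pvRunsAux, pvAdj]
      · have hne : t.dropWhile (· == p) ≠ [] := by simp [hd]
        have hxp' : x ≠ p := by
          have h0 := List.head_dropWhile_not (· == p) hne
          simp only [hd, List.head_cons] at h0
          simpa using h0
        have hlen : r.length ≤ m := by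
          have h1 : (x :: r).length ≤ t.length := by
            rw [← hd]; exact List.length_dropWhile_le _ _
          simp at h1; omega
        rw [ih x r hlen]
        simp [pvAdj, hxp']

theorem pvFold_eq_adj : ∀ (m : Nat) (s : List String) (j : Nat) (acc : Int),
    ∀ (hm : s.length - j = m) (h1 : 1 ≤ j) (h2 : j ≤ s.length),
    (PySem.List.pyRange (j : Int) (s.length : Int) 1).foldl
      (fun changes i =>
        if PySem.List.pyGetD s i "" ≠ PySem.List.pyGetD s (i - 1) "" then changes + 1 else changes) acc
      = acc + pvAdj (s[j - 1]'(by omega)) (s.drop j) := by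
  intro m
  induction m with
  | zero =>
      intro s j acc hm h1 h2
      have hj : j = s.length := by omega
      subst hj
      rw [PySem.List.pyRange_one_eq_nil (le_refl _)]
      simp [pvAdj, List.drop_length]
  | succ m ih =>
      intro s j acc hm h1 h2
      have hjlt : j < s.length := by omega
      rw [PySem.List.pyRange_one_cons (by exact_mod_cast hjlt)]
      rw [List.foldl_cons]
      have hcast : ((j : Int) + 1) = ((j + 1 : Nat) : Int) := by push_cast; ring
      rw [hcast, ih s (j + 1) _ (by omega) (by omega) (by omega)]
      have hget1 : PySem.List.pyGetD s (j : Int) "" = s[j]'hjlt := by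
        rw [PySem.List.pyGetD_eq_getElem s "" (by omega) (by exact_mod_cast hjlt)]
        simp
      have hget0 : PySem.List.pyGetD s ((j : Int) - 1) "" = s[j - 1]'(by omega) := by
        have he : ((j : Int) - 1) = ((j - 1 : Nat) : Int) := by omega
        rw [he, PySem.List.pyGetD_eq_getElem s "" (by omega)
              (by exact_mod_cast (show j - 1 < s.length by omega))]
        simp
      have hdrop : s.drop j = s[j]'hjlt :: s.drop (j + 1) := List.drop_eq_getElem_cons hjlt
      rw [hget1, hget0, hdrop, pvAdj]
      have hidx : (j + 1) - 1 = j := by omega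
      simp only [hidx]
      by_cases h : s[j]'hjlt = s[j - 1]'(by omega) <;> simp [h] <;> try ring

-- ===== VERDICT (by name: the statement is the Claim_ definition above) =====
theorem count_state_changes_py_spec : Claim_equal_count_state_changes_py := by
  intro trajectory _ _
  unfold Spec_count_state_changes_py count_state_changes_py count_state_changes_py_alt
  by_cases hlen : trajectory.length < 2
  · simp [hlen]
  · simp only [hlen, if_false]
    have hslen : (trajectory.map pvStateOf).length = trajectory.length := by simp
    have hfold :
        (PySem.List.pyRange 1 (trajectory.length : Int) 1).foldl
          (fun changes i =>
            if pvStateOf (PySem.List.pyGetD trajectory i []) ≠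
               pvStateOf (PySem.List.pyGetD trajectory (i - 1) []) then changes + 1 else changes) (0 : Int)
        = (PySem.List.pyRange 1 ((trajectory.map pvStateOf).length : Int) 1).foldl
          (fun changes i =>
            if PySem.List.pyGetD (trajectory.map pvStateOf) i "" ≠
               PySem.List.pyGetD (trajectory.map pvStateOf) (i - 1) "" then changes + 1 else changes) (0 : Int) := by
      rw [hslen]
      apply PySem.List.foldl_congr_mem
      intro acc i hi
      have hmem := PySem.List.mem_pyRange_one.mp hi
      have hg : ∀ (k : Int), 0 ≤ k → k < (trajectory.length : Int) →
          pvStateOf (PySem.List.pyGetD trajectory k []) =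
            PySem.List.pyGetD (trajectory.map pvStateOf) k "" := by
        intro k hk0 hk1
        have hk1' : k.toNat < trajectory.length := by omega
        rw [PySem.List.pyGetD_eq_getElem trajectory [] hk0 hk1,
            PySem.List.pyGetD_eq_getElem (trajectory.map pvStateOf) "" hk0 (by rw [hslen]; exact hk1)]
        simp
      rw [hg i (by omega) hmem.2, hg (i - 1) (by omega) (by omega)]
    refine hfold.trans ?_
    rcases hcons : trajectory.map pvStateOf with _ | ⟨p, t⟩
    · exfalso
      have h0 : trajectory = [] := List.map_eq_nil_iff.mp hcons
      rw [h0] at hlen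
      simp at hlen
    · have hfe := pvFold_eq_adj (t.length) (p :: t) 1 0 (by simp) (le_refl 1) (by simp)
      simp only [List.length_cons] at hfe ⊢
      norm_cast at hfe
      rw [hfe]
      rw [pvRunsAux_eq_adj t.length p t (le_refl _)]
      simp
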